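-- pv_equiv track=rewrite | github.com/divyu135/ds-algo-python | 2_array/5_max_difference.py | max_difference_two_pointer
-- ===== SOURCE A (Python) =====
-- def max_difference_two_pointer( array ):
--     """
--         Time Complexity: O(n)
--         Space Complexity: O(1)
--     """
--     _min = array[0]
--     max_difference = None
--     for ele in array[1:]:
--         if ele < _min :
--             _min =  ele
--         if ele > _min:
--             diff = ele - _min
--             if max_difference is None or max_difference < diff:
--                 max_difference = diff
--     return max_difference
-- ===== SOURCE B (Python) =====
-- def max_difference_two_pointer(array):
--     # Suffix-maximum table approach: best diff = max over i of (max of array[i+1:]) - array[i], kept only if positive.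
--     if not array:
--         return None
--     suffix = [array[-1]]
--     for x in reversed(array[:-1]):
--         suffix.append(max(x, suffix[-1]))
--     suffix.reverse()
--     best = None
--     for x, s in zip(array, suffix[1:]):
--         cand = s - x
--         if cand > 0 and (best is None or cand > best):
--             best = cand
--     return best
-- ===== Notes on version B (the rewrite author's own statement) =====
-- stated objective: alternative
-- what changed: Replaces A's single left-to-right running-minimum scan by a two-phase algorithm: a right-to-left pass builds a suffix-maximum table, then a left-to-right pass maximises suffix_max[i+1]-array[i] over i, keeping only positive candidates.
import Mathlib
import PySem

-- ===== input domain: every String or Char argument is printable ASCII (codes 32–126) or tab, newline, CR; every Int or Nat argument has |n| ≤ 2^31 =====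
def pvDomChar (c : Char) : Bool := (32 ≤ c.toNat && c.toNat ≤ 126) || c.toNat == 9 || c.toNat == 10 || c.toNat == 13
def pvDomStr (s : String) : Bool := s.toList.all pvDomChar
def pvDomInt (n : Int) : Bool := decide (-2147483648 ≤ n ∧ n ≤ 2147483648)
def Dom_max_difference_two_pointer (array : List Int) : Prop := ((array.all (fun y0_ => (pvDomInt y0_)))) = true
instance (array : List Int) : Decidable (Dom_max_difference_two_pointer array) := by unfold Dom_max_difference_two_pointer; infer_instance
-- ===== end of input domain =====

-- B replaces A's running-minimum scan by a suffix-maximum table built right-to-left plus a second pass (alternative decomposition, same cost).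


-- ===== PORT A =====
-- literal port of A: _min = array[0]; one pass over array[1:] keeping (running min, best diff)
def max_difference_two_pointer (array : List Int) : Option Int :=
  match array with
  | [] => none  -- A raises IndexError here (array[0]); excluded by Pre_
  | x :: _ =>
    ((PySem.List.slice array (some 1) none).foldl
      (fun (p : Int × Option Int) ele =>
        let m := if ele < p.1 then ele else p.1
        if m < ele then
          let diff := ele - m
          match p.2 with
          | none => (m, some diff)
          | some b => if b < diff then (m, some diff) else (m, p.2)
        else (m, p.2))
      (x, none)).2

-- ===== PORT B =====
-- literal port of B: suffix-max table built by appending while walking reversed(array[:-1]) then reversed;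
-- the Python list with latest append at the END is represented reversed (latest at HEAD), so python suffix[-1]
-- is acc.headD 0 and the final suffix.reverse() is the accumulator itself.
def max_difference_two_pointer_alt (array : List Int) : Option Int :=
  match array.getLast? with
  | none => none  -- if not array: return None
  | some lastv =>
    let suffix := ((PySem.List.slice array none (some (-1))).reverse).foldl
      (fun acc e => (max e (acc.headD 0)) :: acc) [lastv]
    (array.zip suffix.tail).foldl
      (fun best p =>
        let cand := p.2 - p.1
        if 0 < cand then
          match best with
          | none => some cand
          | some b => if b < cand then some cand else best
        else best)
      none

-- ===== PRECONDITION & SPEC =====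
-- Pre_ excludes only the empty list, on which A raises IndexError.
def Pre_max_difference_two_pointer (array : List Int) : Prop := array ≠ []
instance (array : List Int) : Decidable (Pre_max_difference_two_pointer array) := by unfold Pre_max_difference_two_pointer; infer_instance
def pvWitness_max_difference_two_pointer : List Int := [3, 1, 4]

def Spec_max_difference_two_pointer (array : List Int) (out : Option Int) : Prop := out = max_difference_two_pointer_alt array
instance (array : List Int) (out : Option Int) : Decidable (Spec_max_difference_two_pointer array out) := by unfold Spec_max_difference_two_pointer; infer_instance

-- ===== CLAIM (what is proved, stated in full; the proofs are below) =====
def Claim_equal_max_difference_two_pointer : Prop := ∀ (array : List Int), Dom_max_difference_two_pointer array → Pre_max_difference_two_pointer array → Spec_max_difference_two_pointer array (max_difference_two_pointer array)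

-- ===== LEMMAS AND PROOFS =====

-- option-max machinery: both folds compute the max of the strictly positive candidates
def posOpt (d : Int) : Option Int := if 0 < d then some d else none

def omax : Option Int → Option Int → Option Int
  | none, b => b
  | some a, none => some a
  | some a, some b => some (max a b)

def res (l : List Int) : Option Int := l.foldr (fun x acc => omax (posOpt x) acc) none

-- all strictly descending pair differences xs[j] - xs[i], i < j
def pd : List Int → List Int
  | [] => []
  | x :: rest => rest.map (fun e => e - x) ++ pd rest

-- candidate list generated by A's running-minimum pass
def candA (m : Int) : List Int → List Int
  | [] => []
  | e :: rest => (e - min m e) :: candA (min m e) rest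

-- suffix-maximum table
def sufTab : List Int → List Int
  | [] => []
  | x :: rest =>
    match sufTab rest with
    | [] => [x]
    | s :: t => max x s :: s :: t

theorem omax_none_right (a : Option Int) : omax a none = a := by cases a <;> rfl

theorem omax_assoc (a b c : Option Int) : omax (omax a b) c = omax a (omax b c) := by
  cases a <;> cases b <;> cases c <;> simp [omax, max_assoc]

theorem omax_ac (a b c d : Option Int) :
    omax a (omax (omax b c) d) = omax (omax a b) (omax c d) := by
  cases a <;> cases b <;> cases c <;> cases d <;>
    simp [omax, max_comm, max_left_comm]

theorem omax_exch (a b c d : Option Int) :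
    omax (omax a b) (omax c d) = omax (omax a c) (omax b d) := by
  cases a <;> cases b <;> cases c <;> cases d <;>
    simp [omax, max_comm, max_left_comm]

theorem posOpt_max (a b : Int) : posOpt (max a b) = omax (posOpt a) (posOpt b) := by
  unfold posOpt omax
  rcases le_total a b with h | h <;> split_ifs <;> simp_all <;> omega

theorem res_nil : res [] = none := rfl

theorem res_cons (x : Int) (l : List Int) : res (x :: l) = omax (posOpt x) (res l) := rfl

theorem res_append (l1 l2 : List Int) : res (l1 ++ l2) = omax (res l1) (res l2) := by
  induction l1 with
  | nil => rfl
  | cons x t ih => simp [res_cons, ih, omax_assoc]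

theorem res_map_max (f g : Int → Int) (l : List Int) :
    res (l.map (fun x => max (f x) (g x))) = omax (res (l.map f)) (res (l.map g)) := by
  induction l with
  | nil => rfl
  | cons x t ih =>
    simp only [List.map_cons, res_cons, ih, posOpt_max]
    exact omax_exch _ _ _ _

theorem posOpt_sub_min (e m : Int) : posOpt (e - min m e) = posOpt (e - m) := by
  unfold posOpt
  rcases le_total m e with h | h <;> split_ifs <;> simp_all <;> omega

-- A's fold, fused into candA
theorem foldA (l : List Int) (m : Int) (b : Option Int) :
    ((l.foldl
      (fun (p : Int × Option Int) ele =>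
        let mm := if ele < p.1 then ele else p.1
        if mm < ele then
          let diff := ele - mm
          match p.2 with
          | none => (mm, some diff)
          | some bb => if bb < diff then (mm, some diff) else (mm, p.2)
        else (mm, p.2))
      (m, b)).2) = omax b (res (candA m l)) := by
  induction l generalizing m b with
  | nil => cases b <;> rfl
  | cons e t ih =>
    have hstep :
        (let mm := if e < m then e else m
         if mm < e then
           let diff := e - mm
           match b with
           | none => (mm, some diff)
           | some bb => if bb < diff then (mm, some diff) else (mm, b)
         else (mm, b)) = (min m e, omax b (posOpt (e - min m e))) := by
      cases b <;> simp only [omax, posOpt] <;> split_ifs <;>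
        simp_all [min_def, Prod.ext_iff] <;> omega
    simp only [List.foldl_cons, hstep, ih, candA, res_cons, omax_assoc]

theorem candA_spec (l : List Int) (m : Int) :
    res (candA m l) = omax (res (l.map (fun e => e - m))) (res (pd l)) := by
  induction l generalizing m with
  | nil => rfl
  | cons e t ih =>
    have hmap : t.map (fun x => x - min m e) = t.map (fun x => max (x - m) (x - e)) := by
      apply List.map_congr_left; intro x _; omega
    simp only [candA, res_cons, ih, hmap, res_map_max, posOpt_sub_min, pd, List.map_cons,
      res_append]
    exact omax_ac _ _ _ _

theorem sufTab_ne_nil (l : List Int) (h : l ≠ []) : sufTab l ≠ [] := by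
  cases l with
  | nil => exact absurd rfl h
  | cons x t =>
    unfold sufTab
    cases sufTab t <;> simp

theorem sufTab_cons_ne (x : Int) (l : List Int) (h : sufTab l ≠ []) :
    sufTab (x :: l) = max x ((sufTab l).headD 0) :: sufTab l := by
  cases hs : sufTab l with
  | nil => exact absurd hs h
  | cons s t => rw [sufTab, hs]; simp

-- B's table build equals sufTab
theorem build_eq_sufTab (l : List Int) (h : l ≠ []) :
    ((l.dropLast.reverse).foldl (fun acc e => (max e (acc.headD 0)) :: acc) [l.getLast h])
      = sufTab l := by
  rw [List.foldl_reverse]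
  induction l with
  | nil => exact absurd rfl h
  | cons x t ih =>
    cases t with
    | nil => rfl
    | cons y u =>
      have ht : (y :: u : List Int) ≠ [] := by simp
      rw [List.dropLast_cons₂, List.foldr_cons, List.getLast_cons ht, ih ht,
        sufTab_cons_ne x _ (sufTab_ne_nil _ ht)]

theorem sufHead (l : List Int) (h : l ≠ []) (x : Int) :
    posOpt ((sufTab l).headD 0 - x) = res (l.map (fun e => e - x)) := by
  induction l with
  | nil => exact absurd rfl h
  | cons e t ih =>
    cases t with
    | nil => simp [sufTab, res_cons, res_nil, omax_none_right]
    | cons y u =>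
      have ht : (y :: u : List Int) ≠ [] := by simp
      have hne := sufTab_ne_nil (y :: u) ht
      rw [sufTab_cons_ne e _ hne, List.headD_cons]
      have h1 : max e ((sufTab (y :: u)).headD 0) - x
          = max (e - x) ((sufTab (y :: u)).headD 0 - x) := by omega
      rw [h1, posOpt_max, ih ht]
      rfl

-- B's second fold
theorem foldB (l : List (Int × Int)) (b : Option Int) :
    (l.foldl
      (fun best p =>
        let cand := p.2 - p.1
        if 0 < cand then
          match best with
          | none => some cand
          | some bb => if bb < cand then some cand else best
        else best)
      b) = omax b (res (l.map (fun p => p.2 - p.1))) := by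
  induction l generalizing b with
  | nil => cases b <;> rfl
  | cons p t ih =>
    have hstep :
        (let cand := p.2 - p.1
         if 0 < cand then
           match b with
           | none => some cand
           | some bb => if bb < cand then some cand else b
         else b) = omax b (posOpt (p.2 - p.1)) := by
      cases b <;> simp only [omax, posOpt] <;> split_ifs <;> simp_all <;> omega
    simp only [List.foldl_cons, hstep, ih, List.map_cons, res_cons, omax_assoc]

theorem candB_spec (l : List Int) :
    res ((l.zip (sufTab l).tail).map (fun p => p.2 - p.1)) = res (pd l) := by
  induction l with
  | nil => rfl
  | cons x rest ih =>
    cases rest with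
    | nil => rfl
    | cons y u =>
      have ht : (y :: u : List Int) ≠ [] := by simp
      have hne := sufTab_ne_nil (y :: u) ht
      have hsh := sufHead (y :: u) ht x
      rw [sufTab_cons_ne x _ hne, List.tail_cons]
      cases hs : sufTab (y :: u) with
      | nil => exact absurd hs hne
      | cons s t' =>
        rw [hs] at ih hsh
        simp only [List.headD_cons] at hsh
        simp only [List.zip_cons_cons, List.map_cons, res_cons, List.tail_cons] at ih ⊢
        rw [ih, hsh]
        conv_rhs => rw [pd]
        rw [res_append]

-- ===== VERDICT (by name: the statement is the Claim_ definition above) =====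
theorem max_difference_two_pointer_spec : Claim_equal_max_difference_two_pointer := by
  intro array _ hpre
  unfold Spec_max_difference_two_pointer
  cases array with
  | nil => exact absurd rfl hpre
  | cons x rest =>
    have hne : (x :: rest : List Int) ≠ [] := by simp
    have hlast : (x :: rest).getLast? = some ((x :: rest).getLast hne) :=
      List.getLast?_eq_some_getLast hne
    have hA : max_difference_two_pointer (x :: rest) = res (candA x rest) := by
      simp only [max_difference_two_pointer, PySem.List.slice_from_one, List.tail_cons]
      rw [foldA]
      rfl
    have hB : max_difference_two_pointer_alt (x :: rest) = res (pd (x :: rest)) := by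
      simp only [max_difference_two_pointer_alt, hlast, PySem.List.slice_to_neg_one]
      rw [build_eq_sufTab (x :: rest) hne, foldB, candB_spec]
      rfl
    rw [hA, hB, candA_spec]
    simp only [pd, res_append]
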